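-- pv_equiv track=rewrite | github.com/Vibrane/SudokuSolver | sudoku.py | create_boxes
-- ===== SOURCE A (Python) =====
-- def create_boxes(spots):
--     boxes = {}
--     for i in range(1, 10):
--         boxes[i] = set()
--
--     for spot in spots:
--         row = spot[0]
--         col = spot[1]
--
--         if 1 <= row <= 3 and 1 <= col <= 3:
--             boxes[1].add(spot)
--         elif 1 <= row <= 3 and 4 <= col <= 6:
--             boxes[2].add(spot)
--         elif 1 <= row <= 3 and 7 <= col <= 9:
--             boxes[3].add(spot)
--         #####################################
--         elif 4 <= row <= 6 and 1 <= col <= 3: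
--             boxes[4].add(spot)
--         elif 4 <= row <= 6 and 4 <= col <= 6:
--             boxes[5].add(spot)
--         elif 4 <= row <= 6 and 7 <= col <= 9:
--             boxes[6].add(spot)
--         ######################################
--         elif 7 <= row <= 9 and 1 <= col <= 3:
--             boxes[7].add(spot)
--         elif 7 <= row <= 9 and 4 <= col <= 6:
--             boxes[8].add(spot)
--         elif 7 <= row <= 9 and 7 <= col <= 9:
--             boxes[9].add(spot)
--     return boxes
-- ===== SOURCE B (Python) =====
-- def create_boxes(spots):
--     return {
--         3 * r + c + 1: {
--             s for s in spots
--             if 3 * r + 1 <= s[0] <= 3 * r + 3 and 3 * c + 1 <= s[1] <= 3 * c + 3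
--         }
--         for r in range(3)
--         for c in range(3)
--     }
-- ===== Notes on version B (the rewrite author's own statement) =====
-- stated objective: alternative
-- what changed: Replaces A's per-spot single pass with a mutated dict and a 9-branch elif dispatch by a dict comprehension that builds each of the 9 boxes independently with a per-box filtering pass over the spots (band bounds computed from the box coordinates).
import Mathlib
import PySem

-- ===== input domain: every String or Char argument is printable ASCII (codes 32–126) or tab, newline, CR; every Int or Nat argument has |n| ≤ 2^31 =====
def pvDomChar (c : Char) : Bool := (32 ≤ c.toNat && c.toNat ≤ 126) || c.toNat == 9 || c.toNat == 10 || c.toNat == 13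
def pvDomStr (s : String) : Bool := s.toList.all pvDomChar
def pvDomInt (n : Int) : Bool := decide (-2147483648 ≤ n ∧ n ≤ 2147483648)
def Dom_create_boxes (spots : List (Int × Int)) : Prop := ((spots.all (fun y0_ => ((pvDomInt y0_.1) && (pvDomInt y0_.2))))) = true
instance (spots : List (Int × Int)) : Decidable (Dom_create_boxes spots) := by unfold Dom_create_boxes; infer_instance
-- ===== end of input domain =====

-- B builds each of the 9 boxes independently by a per-box filtering pass (dict comprehension) instead of A's single pass with a 9-branch elif dispatch into a mutated dict: an alternative decomposition, same result.


-- ===== PORT A =====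
-- the dict of 9 empty sets: for i in range(1, 10): boxes[i] = set()
def cbInit : PySem.Dict Int (PySem.Set (Int × Int)) :=
  (PySem.List.pyRange 1 10 1).foldl (fun d i => d.insert i PySem.Set.empty) PySem.Dict.empty

-- one iteration of A's per-spot loop: the 9-branch elif chain
def cbStepA (boxes : PySem.Dict Int (PySem.Set (Int × Int))) (spot : Int × Int) :
    PySem.Dict Int (PySem.Set (Int × Int)) :=
  let row := spot.1
  let col := spot.2
  if 1 ≤ row ∧ row ≤ 3 ∧ 1 ≤ col ∧ col ≤ 3 then boxes.modify 1 [] (fun s => s.add spot)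
  else if 1 ≤ row ∧ row ≤ 3 ∧ 4 ≤ col ∧ col ≤ 6 then boxes.modify 2 [] (fun s => s.add spot)
  else if 1 ≤ row ∧ row ≤ 3 ∧ 7 ≤ col ∧ col ≤ 9 then boxes.modify 3 [] (fun s => s.add spot)
  else if 4 ≤ row ∧ row ≤ 6 ∧ 1 ≤ col ∧ col ≤ 3 then boxes.modify 4 [] (fun s => s.add spot)
  else if 4 ≤ row ∧ row ≤ 6 ∧ 4 ≤ col ∧ col ≤ 6 then boxes.modify 5 [] (fun s => s.add spot)
  else if 4 ≤ row ∧ row ≤ 6 ∧ 7 ≤ col ∧ col ≤ 9 then boxes.modify 6 [] (fun s => s.add spot)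
  else if 7 ≤ row ∧ row ≤ 9 ∧ 1 ≤ col ∧ col ≤ 3 then boxes.modify 7 [] (fun s => s.add spot)
  else if 7 ≤ row ∧ row ≤ 9 ∧ 4 ≤ col ∧ col ≤ 6 then boxes.modify 8 [] (fun s => s.add spot)
  else if 7 ≤ row ∧ row ≤ 9 ∧ 7 ≤ col ∧ col ≤ 9 then boxes.modify 9 [] (fun s => s.add spot)
  else boxes

def create_boxes (spots : List (Int × Int)) : List (Int × List (Int × Int)) :=
  (spots.foldl cbStepA cbInit).items

-- ===== PORT B =====
-- the set comprehension {s for s in spots if 3r+1 <= s[0] <= 3r+3 and 3c+1 <= s[1] <= 3c+3}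
def cbBox (r c : Int) (spots : List (Int × Int)) : PySem.Set (Int × Int) :=
  PySem.Set.ofList (spots.filter (fun s =>
    decide (3 * r + 1 ≤ s.1 ∧ s.1 ≤ 3 * r + 3 ∧ 3 * c + 1 ≤ s.2 ∧ s.2 ≤ 3 * c + 3)))

-- the dict comprehension: for r in range(3) for c in range(3), key 3*r+c+1
def create_boxes_alt (spots : List (Int × Int)) : List (Int × List (Int × Int)) :=
  ((PySem.List.pyRange 0 3 1).foldl (fun d r =>
    (PySem.List.pyRange 0 3 1).foldl (fun d c =>
      d.insert (3 * r + c + 1) (cbBox r c spots)) d) PySem.Dict.empty).items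

-- ===== PRECONDITION & SPEC =====
def Spec_create_boxes (spots : List (Int × Int)) (out : List (Int × List (Int × Int))) : Prop := out = create_boxes_alt spots
instance (spots : List (Int × Int)) (out : List (Int × List (Int × Int))) : Decidable (Spec_create_boxes spots out) := by unfold Spec_create_boxes; infer_instance

-- ===== CLAIM (what is proved, stated in full; the proofs are below) =====
def Claim_equal_create_boxes : Prop := ∀ (spots : List (Int × Int)), Dom_create_boxes spots → Spec_create_boxes spots (create_boxes spots)

-- ===== LEMMAS AND PROOFS =====

-- conditional-add fold: what A's loop does to the box-(r,c) entry across the spots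
def cbAcc (r c : Int) (spots : List (Int × Int)) (s : PySem.Set (Int × Int)) :
    PySem.Set (Int × Int) :=
  spots.foldl (fun t x =>
    if 3 * r + 1 ≤ x.1 ∧ x.1 ≤ 3 * r + 3 ∧ 3 * c + 1 ≤ x.2 ∧ x.2 ≤ 3 * c + 3
    then t.add x else t) s

theorem cbAcc_cons (r c : Int) (spot : Int × Int) (l : List (Int × Int))
    (s : PySem.Set (Int × Int)) :
    cbAcc r c (spot :: l) s = cbAcc r c l
      (if 3 * r + 1 ≤ spot.1 ∧ spot.1 ≤ 3 * r + 3 ∧ 3 * c + 1 ≤ spot.2 ∧ spot.2 ≤ 3 * c + 3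
       then s.add spot else s) := rfl

-- B's per-box filter pass computes the same set as the conditional-add fold from empty
theorem cbBox_eq_cbAcc (r c : Int) (spots : List (Int × Int)) :
    cbBox r c spots = cbAcc r c spots PySem.Set.empty := by
  unfold cbBox cbAcc
  rw [PySem.Set.ofList_eq_foldl, List.foldl_filter]
  simp only [decide_eq_true_eq]
  rfl

-- A's loop, started from any dict with keys 1..9 in order, folds each entry by cbAcc
set_option maxHeartbeats 1000000 in
theorem loopA (spots : List (Int × Int))
    (s1 s2 s3 s4 s5 s6 s7 s8 s9 : PySem.Set (Int × Int)) :
    spots.foldl cbStepA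
      (PySem.Dict.mk [(1, s1), (2, s2), (3, s3), (4, s4), (5, s5), (6, s6), (7, s7), (8, s8), (9, s9)]) =
    PySem.Dict.mk [(1, cbAcc 0 0 spots s1), (2, cbAcc 0 1 spots s2), (3, cbAcc 0 2 spots s3),
      (4, cbAcc 1 0 spots s4), (5, cbAcc 1 1 spots s5), (6, cbAcc 1 2 spots s6),
      (7, cbAcc 2 0 spots s7), (8, cbAcc 2 1 spots s8), (9, cbAcc 2 2 spots s9)] := by
  induction spots generalizing s1 s2 s3 s4 s5 s6 s7 s8 s9 with
  | nil => rfl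
  | cons spot rest ih =>
    rw [List.foldl_cons]
    show rest.foldl cbStepA (cbStepA _ spot) = _
    simp only [cbStepA]
    split_ifs with h1 h2 h3 h4 h5 h6 h7 h8 h9
    · simp only [cbAcc_cons]
      rw [if_pos (show 3*0+1 ≤ spot.1 ∧ spot.1 ≤ 3*0+3 ∧ 3*0+1 ≤ spot.2 ∧ spot.2 ≤ 3*0+3 by omega),
        if_neg (show ¬(3*0+1 ≤ spot.1 ∧ spot.1 ≤ 3*0+3 ∧ 3*1+1 ≤ spot.2 ∧ spot.2 ≤ 3*1+3) by omega),
        if_neg (show ¬(3*0+1 ≤ spot.1 ∧ spot.1 ≤ 3*0+3 ∧ 3*2+1 ≤ spot.2 ∧ spot.2 ≤ 3*2+3) by omega),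
        if_neg (show ¬(3*1+1 ≤ spot.1 ∧ spot.1 ≤ 3*1+3 ∧ 3*0+1 ≤ spot.2 ∧ spot.2 ≤ 3*0+3) by omega),
        if_neg (show ¬(3*1+1 ≤ spot.1 ∧ spot.1 ≤ 3*1+3 ∧ 3*1+1 ≤ spot.2 ∧ spot.2 ≤ 3*1+3) by omega),
        if_neg (show ¬(3*1+1 ≤ spot.1 ∧ spot.1 ≤ 3*1+3 ∧ 3*2+1 ≤ spot.2 ∧ spot.2 ≤ 3*2+3) by omega),
        if_neg (show ¬(3*2+1 ≤ spot.1 ∧ spot.1 ≤ 3*2+3 ∧ 3*0+1 ≤ spot.2 ∧ spot.2 ≤ 3*0+3) by omega),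
        if_neg (show ¬(3*2+1 ≤ spot.1 ∧ spot.1 ≤ 3*2+3 ∧ 3*1+1 ≤ spot.2 ∧ spot.2 ≤ 3*1+3) by omega),
        if_neg (show ¬(3*2+1 ≤ spot.1 ∧ spot.1 ≤ 3*2+3 ∧ 3*2+1 ≤ spot.2 ∧ spot.2 ≤ 3*2+3) by omega)]
      exact ih _ _ _ _ _ _ _ _ _
    · simp only [cbAcc_cons]
      rw [if_neg (show ¬(3*0+1 ≤ spot.1 ∧ spot.1 ≤ 3*0+3 ∧ 3*0+1 ≤ spot.2 ∧ spot.2 ≤ 3*0+3) by omega),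
        if_pos (show 3*0+1 ≤ spot.1 ∧ spot.1 ≤ 3*0+3 ∧ 3*1+1 ≤ spot.2 ∧ spot.2 ≤ 3*1+3 by omega),
        if_neg (show ¬(3*0+1 ≤ spot.1 ∧ spot.1 ≤ 3*0+3 ∧ 3*2+1 ≤ spot.2 ∧ spot.2 ≤ 3*2+3) by omega),
        if_neg (show ¬(3*1+1 ≤ spot.1 ∧ spot.1 ≤ 3*1+3 ∧ 3*0+1 ≤ spot.2 ∧ spot.2 ≤ 3*0+3) by omega),
        if_neg (show ¬(3*1+1 ≤ spot.1 ∧ spot.1 ≤ 3*1+3 ∧ 3*1+1 ≤ spot.2 ∧ spot.2 ≤ 3*1+3) by omega),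
        if_neg (show ¬(3*1+1 ≤ spot.1 ∧ spot.1 ≤ 3*1+3 ∧ 3*2+1 ≤ spot.2 ∧ spot.2 ≤ 3*2+3) by omega),
        if_neg (show ¬(3*2+1 ≤ spot.1 ∧ spot.1 ≤ 3*2+3 ∧ 3*0+1 ≤ spot.2 ∧ spot.2 ≤ 3*0+3) by omega),
        if_neg (show ¬(3*2+1 ≤ spot.1 ∧ spot.1 ≤ 3*2+3 ∧ 3*1+1 ≤ spot.2 ∧ spot.2 ≤ 3*1+3) by omega),
        if_neg (show ¬(3*2+1 ≤ spot.1 ∧ spot.1 ≤ 3*2+3 ∧ 3*2+1 ≤ spot.2 ∧ spot.2 ≤ 3*2+3) by omega)]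
      exact ih _ _ _ _ _ _ _ _ _
    · simp only [cbAcc_cons]
      rw [if_neg (show ¬(3*0+1 ≤ spot.1 ∧ spot.1 ≤ 3*0+3 ∧ 3*0+1 ≤ spot.2 ∧ spot.2 ≤ 3*0+3) by omega),
        if_neg (show ¬(3*0+1 ≤ spot.1 ∧ spot.1 ≤ 3*0+3 ∧ 3*1+1 ≤ spot.2 ∧ spot.2 ≤ 3*1+3) by omega),
        if_pos (show 3*0+1 ≤ spot.1 ∧ spot.1 ≤ 3*0+3 ∧ 3*2+1 ≤ spot.2 ∧ spot.2 ≤ 3*2+3 by omega),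
        if_neg (show ¬(3*1+1 ≤ spot.1 ∧ spot.1 ≤ 3*1+3 ∧ 3*0+1 ≤ spot.2 ∧ spot.2 ≤ 3*0+3) by omega),
        if_neg (show ¬(3*1+1 ≤ spot.1 ∧ spot.1 ≤ 3*1+3 ∧ 3*1+1 ≤ spot.2 ∧ spot.2 ≤ 3*1+3) by omega),
        if_neg (show ¬(3*1+1 ≤ spot.1 ∧ spot.1 ≤ 3*1+3 ∧ 3*2+1 ≤ spot.2 ∧ spot.2 ≤ 3*2+3) by omega),
        if_neg (show ¬(3*2+1 ≤ spot.1 ∧ spot.1 ≤ 3*2+3 ∧ 3*0+1 ≤ spot.2 ∧ spot.2 ≤ 3*0+3) by omega),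
        if_neg (show ¬(3*2+1 ≤ spot.1 ∧ spot.1 ≤ 3*2+3 ∧ 3*1+1 ≤ spot.2 ∧ spot.2 ≤ 3*1+3) by omega),
        if_neg (show ¬(3*2+1 ≤ spot.1 ∧ spot.1 ≤ 3*2+3 ∧ 3*2+1 ≤ spot.2 ∧ spot.2 ≤ 3*2+3) by omega)]
      exact ih _ _ _ _ _ _ _ _ _
    · simp only [cbAcc_cons]
      rw [if_neg (show ¬(3*0+1 ≤ spot.1 ∧ spot.1 ≤ 3*0+3 ∧ 3*0+1 ≤ spot.2 ∧ spot.2 ≤ 3*0+3) by omega),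
        if_neg (show ¬(3*0+1 ≤ spot.1 ∧ spot.1 ≤ 3*0+3 ∧ 3*1+1 ≤ spot.2 ∧ spot.2 ≤ 3*1+3) by omega),
        if_neg (show ¬(3*0+1 ≤ spot.1 ∧ spot.1 ≤ 3*0+3 ∧ 3*2+1 ≤ spot.2 ∧ spot.2 ≤ 3*2+3) by omega),
        if_pos (show 3*1+1 ≤ spot.1 ∧ spot.1 ≤ 3*1+3 ∧ 3*0+1 ≤ spot.2 ∧ spot.2 ≤ 3*0+3 by omega),
        if_neg (show ¬(3*1+1 ≤ spot.1 ∧ spot.1 ≤ 3*1+3 ∧ 3*1+1 ≤ spot.2 ∧ spot.2 ≤ 3*1+3) by omega),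
        if_neg (show ¬(3*1+1 ≤ spot.1 ∧ spot.1 ≤ 3*1+3 ∧ 3*2+1 ≤ spot.2 ∧ spot.2 ≤ 3*2+3) by omega),
        if_neg (show ¬(3*2+1 ≤ spot.1 ∧ spot.1 ≤ 3*2+3 ∧ 3*0+1 ≤ spot.2 ∧ spot.2 ≤ 3*0+3) by omega),
        if_neg (show ¬(3*2+1 ≤ spot.1 ∧ spot.1 ≤ 3*2+3 ∧ 3*1+1 ≤ spot.2 ∧ spot.2 ≤ 3*1+3) by omega),
        if_neg (show ¬(3*2+1 ≤ spot.1 ∧ spot.1 ≤ 3*2+3 ∧ 3*2+1 ≤ spot.2 ∧ spot.2 ≤ 3*2+3) by omega)]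
      exact ih _ _ _ _ _ _ _ _ _
    · simp only [cbAcc_cons]
      rw [if_neg (show ¬(3*0+1 ≤ spot.1 ∧ spot.1 ≤ 3*0+3 ∧ 3*0+1 ≤ spot.2 ∧ spot.2 ≤ 3*0+3) by omega),
        if_neg (show ¬(3*0+1 ≤ spot.1 ∧ spot.1 ≤ 3*0+3 ∧ 3*1+1 ≤ spot.2 ∧ spot.2 ≤ 3*1+3) by omega),
        if_neg (show ¬(3*0+1 ≤ spot.1 ∧ spot.1 ≤ 3*0+3 ∧ 3*2+1 ≤ spot.2 ∧ spot.2 ≤ 3*2+3) by omega),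
        if_neg (show ¬(3*1+1 ≤ spot.1 ∧ spot.1 ≤ 3*1+3 ∧ 3*0+1 ≤ spot.2 ∧ spot.2 ≤ 3*0+3) by omega),
        if_pos (show 3*1+1 ≤ spot.1 ∧ spot.1 ≤ 3*1+3 ∧ 3*1+1 ≤ spot.2 ∧ spot.2 ≤ 3*1+3 by omega),
        if_neg (show ¬(3*1+1 ≤ spot.1 ∧ spot.1 ≤ 3*1+3 ∧ 3*2+1 ≤ spot.2 ∧ spot.2 ≤ 3*2+3) by omega),
        if_neg (show ¬(3*2+1 ≤ spot.1 ∧ spot.1 ≤ 3*2+3 ∧ 3*0+1 ≤ spot.2 ∧ spot.2 ≤ 3*0+3) by omega),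
        if_neg (show ¬(3*2+1 ≤ spot.1 ∧ spot.1 ≤ 3*2+3 ∧ 3*1+1 ≤ spot.2 ∧ spot.2 ≤ 3*1+3) by omega),
        if_neg (show ¬(3*2+1 ≤ spot.1 ∧ spot.1 ≤ 3*2+3 ∧ 3*2+1 ≤ spot.2 ∧ spot.2 ≤ 3*2+3) by omega)]
      exact ih _ _ _ _ _ _ _ _ _
    · simp only [cbAcc_cons]
      rw [if_neg (show ¬(3*0+1 ≤ spot.1 ∧ spot.1 ≤ 3*0+3 ∧ 3*0+1 ≤ spot.2 ∧ spot.2 ≤ 3*0+3) by omega),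
        if_neg (show ¬(3*0+1 ≤ spot.1 ∧ spot.1 ≤ 3*0+3 ∧ 3*1+1 ≤ spot.2 ∧ spot.2 ≤ 3*1+3) by omega),
        if_neg (show ¬(3*0+1 ≤ spot.1 ∧ spot.1 ≤ 3*0+3 ∧ 3*2+1 ≤ spot.2 ∧ spot.2 ≤ 3*2+3) by omega),
        if_neg (show ¬(3*1+1 ≤ spot.1 ∧ spot.1 ≤ 3*1+3 ∧ 3*0+1 ≤ spot.2 ∧ spot.2 ≤ 3*0+3) by omega),
        if_neg (show ¬(3*1+1 ≤ spot.1 ∧ spot.1 ≤ 3*1+3 ∧ 3*1+1 ≤ spot.2 ∧ spot.2 ≤ 3*1+3) by omega),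
        if_pos (show 3*1+1 ≤ spot.1 ∧ spot.1 ≤ 3*1+3 ∧ 3*2+1 ≤ spot.2 ∧ spot.2 ≤ 3*2+3 by omega),
        if_neg (show ¬(3*2+1 ≤ spot.1 ∧ spot.1 ≤ 3*2+3 ∧ 3*0+1 ≤ spot.2 ∧ spot.2 ≤ 3*0+3) by omega),
        if_neg (show ¬(3*2+1 ≤ spot.1 ∧ spot.1 ≤ 3*2+3 ∧ 3*1+1 ≤ spot.2 ∧ spot.2 ≤ 3*1+3) by omega),
        if_neg (show ¬(3*2+1 ≤ spot.1 ∧ spot.1 ≤ 3*2+3 ∧ 3*2+1 ≤ spot.2 ∧ spot.2 ≤ 3*2+3) by omega)]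
      exact ih _ _ _ _ _ _ _ _ _
    · simp only [cbAcc_cons]
      rw [if_neg (show ¬(3*0+1 ≤ spot.1 ∧ spot.1 ≤ 3*0+3 ∧ 3*0+1 ≤ spot.2 ∧ spot.2 ≤ 3*0+3) by omega),
        if_neg (show ¬(3*0+1 ≤ spot.1 ∧ spot.1 ≤ 3*0+3 ∧ 3*1+1 ≤ spot.2 ∧ spot.2 ≤ 3*1+3) by omega),
        if_neg (show ¬(3*0+1 ≤ spot.1 ∧ spot.1 ≤ 3*0+3 ∧ 3*2+1 ≤ spot.2 ∧ spot.2 ≤ 3*2+3) by omega),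
        if_neg (show ¬(3*1+1 ≤ spot.1 ∧ spot.1 ≤ 3*1+3 ∧ 3*0+1 ≤ spot.2 ∧ spot.2 ≤ 3*0+3) by omega),
        if_neg (show ¬(3*1+1 ≤ spot.1 ∧ spot.1 ≤ 3*1+3 ∧ 3*1+1 ≤ spot.2 ∧ spot.2 ≤ 3*1+3) by omega),
        if_neg (show ¬(3*1+1 ≤ spot.1 ∧ spot.1 ≤ 3*1+3 ∧ 3*2+1 ≤ spot.2 ∧ spot.2 ≤ 3*2+3) by omega),
        if_pos (show 3*2+1 ≤ spot.1 ∧ spot.1 ≤ 3*2+3 ∧ 3*0+1 ≤ spot.2 ∧ spot.2 ≤ 3*0+3 by omega),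
        if_neg (show ¬(3*2+1 ≤ spot.1 ∧ spot.1 ≤ 3*2+3 ∧ 3*1+1 ≤ spot.2 ∧ spot.2 ≤ 3*1+3) by omega),
        if_neg (show ¬(3*2+1 ≤ spot.1 ∧ spot.1 ≤ 3*2+3 ∧ 3*2+1 ≤ spot.2 ∧ spot.2 ≤ 3*2+3) by omega)]
      exact ih _ _ _ _ _ _ _ _ _
    · simp only [cbAcc_cons]
      rw [if_neg (show ¬(3*0+1 ≤ spot.1 ∧ spot.1 ≤ 3*0+3 ∧ 3*0+1 ≤ spot.2 ∧ spot.2 ≤ 3*0+3) by omega),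
        if_neg (show ¬(3*0+1 ≤ spot.1 ∧ spot.1 ≤ 3*0+3 ∧ 3*1+1 ≤ spot.2 ∧ spot.2 ≤ 3*1+3) by omega),
        if_neg (show ¬(3*0+1 ≤ spot.1 ∧ spot.1 ≤ 3*0+3 ∧ 3*2+1 ≤ spot.2 ∧ spot.2 ≤ 3*2+3) by omega),
        if_neg (show ¬(3*1+1 ≤ spot.1 ∧ spot.1 ≤ 3*1+3 ∧ 3*0+1 ≤ spot.2 ∧ spot.2 ≤ 3*0+3) by omega),
        if_neg (show ¬(3*1+1 ≤ spot.1 ∧ spot.1 ≤ 3*1+3 ∧ 3*1+1 ≤ spot.2 ∧ spot.2 ≤ 3*1+3) by omega),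
        if_neg (show ¬(3*1+1 ≤ spot.1 ∧ spot.1 ≤ 3*1+3 ∧ 3*2+1 ≤ spot.2 ∧ spot.2 ≤ 3*2+3) by omega),
        if_neg (show ¬(3*2+1 ≤ spot.1 ∧ spot.1 ≤ 3*2+3 ∧ 3*0+1 ≤ spot.2 ∧ spot.2 ≤ 3*0+3) by omega),
        if_pos (show 3*2+1 ≤ spot.1 ∧ spot.1 ≤ 3*2+3 ∧ 3*1+1 ≤ spot.2 ∧ spot.2 ≤ 3*1+3 by omega),
        if_neg (show ¬(3*2+1 ≤ spot.1 ∧ spot.1 ≤ 3*2+3 ∧ 3*2+1 ≤ spot.2 ∧ spot.2 ≤ 3*2+3) by omega)]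
      exact ih _ _ _ _ _ _ _ _ _
    · simp only [cbAcc_cons]
      rw [if_neg (show ¬(3*0+1 ≤ spot.1 ∧ spot.1 ≤ 3*0+3 ∧ 3*0+1 ≤ spot.2 ∧ spot.2 ≤ 3*0+3) by omega),
        if_neg (show ¬(3*0+1 ≤ spot.1 ∧ spot.1 ≤ 3*0+3 ∧ 3*1+1 ≤ spot.2 ∧ spot.2 ≤ 3*1+3) by omega),
        if_neg (show ¬(3*0+1 ≤ spot.1 ∧ spot.1 ≤ 3*0+3 ∧ 3*2+1 ≤ spot.2 ∧ spot.2 ≤ 3*2+3) by omega),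
        if_neg (show ¬(3*1+1 ≤ spot.1 ∧ spot.1 ≤ 3*1+3 ∧ 3*0+1 ≤ spot.2 ∧ spot.2 ≤ 3*0+3) by omega),
        if_neg (show ¬(3*1+1 ≤ spot.1 ∧ spot.1 ≤ 3*1+3 ∧ 3*1+1 ≤ spot.2 ∧ spot.2 ≤ 3*1+3) by omega),
        if_neg (show ¬(3*1+1 ≤ spot.1 ∧ spot.1 ≤ 3*1+3 ∧ 3*2+1 ≤ spot.2 ∧ spot.2 ≤ 3*2+3) by omega),
        if_neg (show ¬(3*2+1 ≤ spot.1 ∧ spot.1 ≤ 3*2+3 ∧ 3*0+1 ≤ spot.2 ∧ spot.2 ≤ 3*0+3) by omega),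
        if_neg (show ¬(3*2+1 ≤ spot.1 ∧ spot.1 ≤ 3*2+3 ∧ 3*1+1 ≤ spot.2 ∧ spot.2 ≤ 3*1+3) by omega),
        if_pos (show 3*2+1 ≤ spot.1 ∧ spot.1 ≤ 3*2+3 ∧ 3*2+1 ≤ spot.2 ∧ spot.2 ≤ 3*2+3 by omega)]
      exact ih _ _ _ _ _ _ _ _ _
    · simp only [cbAcc_cons]
      rw [if_neg (show ¬(3*0+1 ≤ spot.1 ∧ spot.1 ≤ 3*0+3 ∧ 3*0+1 ≤ spot.2 ∧ spot.2 ≤ 3*0+3) by omega),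
        if_neg (show ¬(3*0+1 ≤ spot.1 ∧ spot.1 ≤ 3*0+3 ∧ 3*1+1 ≤ spot.2 ∧ spot.2 ≤ 3*1+3) by omega),
        if_neg (show ¬(3*0+1 ≤ spot.1 ∧ spot.1 ≤ 3*0+3 ∧ 3*2+1 ≤ spot.2 ∧ spot.2 ≤ 3*2+3) by omega),
        if_neg (show ¬(3*1+1 ≤ spot.1 ∧ spot.1 ≤ 3*1+3 ∧ 3*0+1 ≤ spot.2 ∧ spot.2 ≤ 3*0+3) by omega),
        if_neg (show ¬(3*1+1 ≤ spot.1 ∧ spot.1 ≤ 3*1+3 ∧ 3*1+1 ≤ spot.2 ∧ spot.2 ≤ 3*1+3) by omega),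
        if_neg (show ¬(3*1+1 ≤ spot.1 ∧ spot.1 ≤ 3*1+3 ∧ 3*2+1 ≤ spot.2 ∧ spot.2 ≤ 3*2+3) by omega),
        if_neg (show ¬(3*2+1 ≤ spot.1 ∧ spot.1 ≤ 3*2+3 ∧ 3*0+1 ≤ spot.2 ∧ spot.2 ≤ 3*0+3) by omega),
        if_neg (show ¬(3*2+1 ≤ spot.1 ∧ spot.1 ≤ 3*2+3 ∧ 3*1+1 ≤ spot.2 ∧ spot.2 ≤ 3*1+3) by omega),
        if_neg (show ¬(3*2+1 ≤ spot.1 ∧ spot.1 ≤ 3*2+3 ∧ 3*2+1 ≤ spot.2 ∧ spot.2 ≤ 3*2+3) by omega)]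
      exact ih _ _ _ _ _ _ _ _ _

-- ===== VERDICT (by name: the statement is the Claim_ definition above) =====
set_option maxHeartbeats 2000000 in
theorem create_boxes_spec : Claim_equal_create_boxes := by
  intro spots _
  show create_boxes spots = create_boxes_alt spots
  unfold create_boxes
  rw [show cbInit = PySem.Dict.mk
        [(1, PySem.Set.empty), (2, PySem.Set.empty), (3, PySem.Set.empty),
         (4, PySem.Set.empty), (5, PySem.Set.empty), (6, PySem.Set.empty),
         (7, PySem.Set.empty), (8, PySem.Set.empty), (9, PySem.Set.empty)] from rfl,
      loopA,
      show create_boxes_alt spots =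
        [(1, cbBox 0 0 spots), (2, cbBox 0 1 spots), (3, cbBox 0 2 spots),
         (4, cbBox 1 0 spots), (5, cbBox 1 1 spots), (6, cbBox 1 2 spots),
         (7, cbBox 2 0 spots), (8, cbBox 2 1 spots), (9, cbBox 2 2 spots)] from rfl]
  simp only [cbBox_eq_cbAcc]
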